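-- pv_equiv track=rewrite | github.com/JonathanJdeKoning/CompetitiveProgramming | Problems/LeetCode/1013.py | canThreePartsEqualSum
-- ===== SOURCE A (Python) =====
-- from typing import List
--
-- def canThreePartsEqualSum(arr: List[int]) -> bool:
--     numsecs = 0
--     total = sum(arr)
--     if total%3!= 0: return False
--     need = total//3
--     section = 0
--     for i, c in enumerate(arr):
--         section += c
--         if section == need:
--             section = 0
--             numsecs += 1
--             if numsecs == 3:
--                 if sum(arr[i+1:]) ==0:
--                     return True
--
--     return False
-- ===== SOURCE B (Python) =====
-- from typing import List
--
-- def canThreePartsEqualSum(arr: List[int]) -> bool: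
--     total = sum(arr)
--     if total % 3 != 0:
--         return False
--     need = total // 3
--     prefix = 0
--     found = False
--     for c in arr[:-1]:
--         prefix += c
--         if not found:
--             found = prefix == need
--         elif prefix == 2 * need:
--             return True
--     return False
-- ===== Notes on version B (the rewrite author's own statement) =====
-- stated objective: simpler
-- what changed: Replaces A's reset-the-running-sum, count-sections-to-three scan with a suffix re-sum check by a single non-resetting prefix-sum scan over arr[:-1] that first locates prefix==need and then returns True at prefix==2*need; no section counter and no slice re-summing.
import Mathlib
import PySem

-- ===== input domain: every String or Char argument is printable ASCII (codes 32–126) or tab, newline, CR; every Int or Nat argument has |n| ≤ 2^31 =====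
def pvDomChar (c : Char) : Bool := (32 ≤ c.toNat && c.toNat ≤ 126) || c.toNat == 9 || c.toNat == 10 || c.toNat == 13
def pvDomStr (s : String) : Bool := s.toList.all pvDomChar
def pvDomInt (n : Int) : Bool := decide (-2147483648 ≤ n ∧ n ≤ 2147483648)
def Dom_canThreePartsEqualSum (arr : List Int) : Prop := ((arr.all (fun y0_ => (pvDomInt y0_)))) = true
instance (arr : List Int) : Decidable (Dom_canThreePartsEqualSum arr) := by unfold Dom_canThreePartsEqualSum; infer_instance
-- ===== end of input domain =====

-- B replaces A's reset-and-count-sections scan (with a suffix re-sum) by a plain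
-- non-resetting prefix-sum scan against the two targets need and 2*need (objective: simpler).

-- ===== PORT A =====
-- loop body of `for i, c in enumerate(arr)` with state (section, numsecs)
def canThreeGoA (arr : List Int) (need : Int) : List (Int × Int) → Int → Int → Bool
  | [], _, _ => false
  | (i, c) :: rest, sec, numsecs =>
      let s := sec + c
      if s = need then
        let k := numsecs + 1
        -- `if numsecs == 3: if sum(arr[i+1:]) == 0: return True`; otherwise fall through
        if k = 3 ∧ (PySem.List.slice arr (some (i + 1)) none).sum = 0 then true
        else canThreeGoA arr need rest 0 k
      else canThreeGoA arr need rest s numsecs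

def canThreePartsEqualSum (arr : List Int) : Bool :=
  let total := arr.sum
  if PySem.Int.mod total 3 ≠ 0 then false
  else
    let need := PySem.Int.floordiv total 3
    canThreeGoA arr need (PySem.List.enumerate arr) 0 0

-- ===== PORT B =====
-- loop body of `for c in arr[:-1]` with state (prefix, found)
def canThreeGoB (need : Int) : List Int → Int → Bool → Bool
  | [], _, _ => false
  | c :: rest, pfx, found =>
      let p := pfx + c
      if !found then canThreeGoB need rest p (p = need)
      else if p = 2 * need then true
      else canThreeGoB need rest p found

def canThreePartsEqualSum_alt (arr : List Int) : Bool :=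
  let total := arr.sum
  if PySem.Int.mod total 3 ≠ 0 then false
  else
    let need := PySem.Int.floordiv total 3
    canThreeGoB need (PySem.List.slice arr none (some (-1))) 0 false  -- arr[:-1]

-- ===== PRECONDITION & SPEC =====
def Spec_canThreePartsEqualSum (arr : List Int) (out : Bool) : Prop := out = canThreePartsEqualSum_alt arr
instance (arr : List Int) (out : Bool) : Decidable (Spec_canThreePartsEqualSum arr out) := by unfold Spec_canThreePartsEqualSum; infer_instance

-- ===== CLAIM (what is proved, stated in full; the proofs are below) =====
def Claim_equal_canThreePartsEqualSum : Prop := ∀ (arr : List Int), Dom_canThreePartsEqualSum arr → Spec_canThreePartsEqualSum arr (canThreePartsEqualSum arr)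

-- ===== LEMMAS AND PROOFS =====

-- arr[i+1:] for i = pre.length, arr = pre ++ c :: rest, is rest
theorem canThree_slice_suffix (pre rest : List Int) (c : Int) :
    PySem.List.slice (pre ++ c :: rest) (some ((pre.length : Int) + 1)) none = rest := by
  have h : ((pre.length : Int) + 1) = ((pre.length + 1 : Nat) : Int) := by push_cast; ring
  rw [h, PySem.List.slice_from_natCast]
  simp

-- Once A has counted two sections, it always returns true (the third hit has a zero suffix).
theorem canThreeA2 (arr : List Int) (need : Int) (h3 : arr.sum = 3 * need) :
    ∀ (l₂ pre : List Int), l₂ ≠ [] → arr = pre ++ l₂ →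
      canThreeGoA arr need (PySem.List.enumerate l₂ (pre.length : Int)) (pre.sum - 2 * need) 2 = true := by
  intro l₂
  induction l₂ with
  | nil => intro pre h _; exact absurd rfl h
  | cons c rest ih =>
    intro pre _ harr
    rw [PySem.List.enumerate_cons]
    by_cases hp : pre.sum + c = 3 * need
    · have hhit : pre.sum - 2 * need + c = need := by omega
      have hsuf : rest.sum = 0 := by
        have := harr ▸ h3; simp [List.sum_append] at this; omega
      simp only [canThreeGoA, hhit, if_pos]
      rw [harr, canThree_slice_suffix]
      rw [if_pos (show (2:Int) + 1 = 3 ∧ rest.sum = 0 from ⟨by norm_num, hsuf⟩)]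
    · have hrest : rest ≠ [] := by
        intro h; subst h
        have := harr ▸ h3; simp [List.sum_append] at this; omega
      have hmiss : ¬ (pre.sum - 2 * need + c = need) := by omega
      simp only [canThreeGoA, if_neg hmiss]
      have := ih (pre ++ [c]) hrest (by simp [harr])
      simpa [List.sum_append, sub_add_eq_add_sub] using this
      -- state: section = pre.sum - 2*need + c = (pre++[c]).sum - 2*need

-- a conjunction whose first leg fails
theorem canThree_notk {k : Int} (hk : k ≠ 3) (P : Prop) : ¬ (k = 3 ∧ P) :=
  fun h => hk h.1

-- Simulation, phase 1: A has counted one section (numsecs = 1), B has found = true.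
theorem canThreeM1 (arr : List Int) (need : Int) (h3 : arr.sum = 3 * need) :
    ∀ (l₂ pre : List Int), arr = pre ++ l₂ →
      canThreeGoA arr need (PySem.List.enumerate l₂ (pre.length : Int)) (pre.sum - need) 1
        = canThreeGoB need l₂.dropLast pre.sum true := by
  intro l₂
  induction l₂ with
  | nil => intro pre _; simp [canThreeGoA, canThreeGoB, PySem.List.enumerate]
  | cons c rest ih =>
    intro pre harr
    rw [PySem.List.enumerate_cons]
    have hlen : ((pre ++ [c]).length : Int) = (pre.length : Int) + 1 := by simp
    have hsum : (pre ++ [c]).sum = pre.sum + c := by simp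
    cases rest with
    | nil =>
      -- last element: B never sees it, and A cannot reach numsecs = 3 in one step
      by_cases h1 : pre.sum - need + c = need
      · simp only [canThreeGoA, if_pos h1]
        rw [if_neg (canThree_notk (by norm_num) _)]
        simp [canThreeGoA, canThreeGoB, PySem.List.enumerate]
      · simp only [canThreeGoA, if_neg h1]
        simp [canThreeGoA, canThreeGoB, PySem.List.enumerate]
    | cons d rest' =>
      have harr' : arr = (pre ++ [c]) ++ d :: rest' := by simp [harr]
      rw [show (c :: d :: rest').dropLast = c :: (d :: rest').dropLast from by simp]
      by_cases hp2 : pre.sum + c = 2 * need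
      · have h1 : pre.sum - need + c = need := by omega
        simp only [canThreeGoA, if_pos h1]
        rw [if_neg (canThree_notk (by norm_num) _)]
        have hA2 := canThreeA2 arr need h3 (d :: rest') (pre ++ [c]) (by simp) harr'
        rw [hlen, hsum, show pre.sum + c - 2 * need = (0:Int) from by omega] at hA2
        rw [show (1:Int) + 1 = 2 from by norm_num, hA2]
        simp [canThreeGoB, hp2]
      · have h1 : ¬ (pre.sum - need + c = need) := by omega
        simp only [canThreeGoA, if_neg h1]
        have hIH := ih (pre ++ [c]) harr'
        rw [hlen, hsum] at hIH
        rw [show pre.sum - need + c = pre.sum + c - need from by ring, hIH]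
        simp [canThreeGoB, hp2]

-- Simulation, phase 0: no section counted yet (numsecs = 0), B has found = false.
theorem canThreeM0 (arr : List Int) (need : Int) (h3 : arr.sum = 3 * need) :
    ∀ (l₂ pre : List Int), arr = pre ++ l₂ →
      canThreeGoA arr need (PySem.List.enumerate l₂ (pre.length : Int)) pre.sum 0
        = canThreeGoB need l₂.dropLast pre.sum false := by
  intro l₂
  induction l₂ with
  | nil => intro pre _; simp [canThreeGoA, canThreeGoB, PySem.List.enumerate]
  | cons c rest ih =>
    intro pre harr
    rw [PySem.List.enumerate_cons]
    have hlen : ((pre ++ [c]).length : Int) = (pre.length : Int) + 1 := by simp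
    have hsum : (pre ++ [c]).sum = pre.sum + c := by simp
    cases rest with
    | nil =>
      by_cases h1 : pre.sum + c = need
      · simp only [canThreeGoA, if_pos h1]
        rw [if_neg (canThree_notk (by norm_num) _)]
        simp [canThreeGoA, canThreeGoB, PySem.List.enumerate]
      · simp only [canThreeGoA, if_neg h1]
        simp [canThreeGoA, canThreeGoB, PySem.List.enumerate]
    | cons d rest' =>
      have harr' : arr = (pre ++ [c]) ++ d :: rest' := by simp [harr]
      rw [show (c :: d :: rest').dropLast = c :: (d :: rest').dropLast from by simp]
      by_cases hpn : pre.sum + c = need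
      · simp only [canThreeGoA, if_pos hpn]
        rw [if_neg (canThree_notk (by norm_num) _)]
        have hM1 := canThreeM1 arr need h3 (d :: rest') (pre ++ [c]) harr'
        rw [hlen, hsum, show pre.sum + c - need = (0:Int) from by rw [hpn]; ring] at hM1
        rw [show (0:Int) + 1 = 1 from by norm_num, hM1]
        simp [canThreeGoB, hpn]
      · simp only [canThreeGoA, if_neg hpn]
        have hIH := ih (pre ++ [c]) harr'
        rw [hlen, hsum] at hIH
        rw [hIH]
        simp [canThreeGoB, hpn]

-- ===== VERDICT (by name: the statement is the Claim_ definition above) =====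
theorem canThreePartsEqualSum_spec : Claim_equal_canThreePartsEqualSum := by
  intro arr _
  unfold Spec_canThreePartsEqualSum canThreePartsEqualSum canThreePartsEqualSum_alt
  by_cases hm : PySem.Int.mod arr.sum 3 ≠ 0
  · rw [if_pos hm, if_pos hm]
  · rw [if_neg hm, if_neg hm]
    rw [not_not] at hm
    have hfd := PySem.Int.floordiv_mul_add_mod arr.sum 3
    have hM := canThreeM0 arr (PySem.Int.floordiv arr.sum 3) (by omega) arr [] rfl
    simp only [List.sum_nil, List.length_nil, Nat.cast_zero] at hM
    rw [PySem.List.slice_to_neg_one]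
    exact hM
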